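-- pv_equiv track=rewrite | github.com/SergiFlorensa/OpenCareM | app/services/rag_retriever.py | _gaps_from_ids
-- ===== SOURCE A (Python) =====
-- def _gaps_from_ids(ids: list[int]) -> list[int]:
--     gaps: list[int] = []
--     previous = 0
--     for value in ids:
--         safe_value = max(0, int(value))
--         gap = safe_value - previous
--         if gap <= 0:
--             continue
--         gaps.append(gap)
--         previous = safe_value
--     return gaps
-- ===== SOURCE B (Python) =====
-- def _gaps_from_ids(ids: list[int]) -> list[int]:
--     # Precompute the running maximum of the clamped values, then emit the
--     # positive differences between successive running-max values.
--     run = [0]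
--     for v in ids:
--         run.append(max(run[-1], max(0, int(v))))
--     return [b - a for a, b in zip(run, run[1:]) if b > a]
-- ===== Notes on version B (the rewrite author's own statement) =====
-- stated objective: alternative
-- what changed: Replaces the single stateful filter loop (previous + conditional append) by a two-phase pipeline: first build the running-maximum sequence of the clamped ids, then emit the positive differences of consecutive running-max values.
import Mathlib
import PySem

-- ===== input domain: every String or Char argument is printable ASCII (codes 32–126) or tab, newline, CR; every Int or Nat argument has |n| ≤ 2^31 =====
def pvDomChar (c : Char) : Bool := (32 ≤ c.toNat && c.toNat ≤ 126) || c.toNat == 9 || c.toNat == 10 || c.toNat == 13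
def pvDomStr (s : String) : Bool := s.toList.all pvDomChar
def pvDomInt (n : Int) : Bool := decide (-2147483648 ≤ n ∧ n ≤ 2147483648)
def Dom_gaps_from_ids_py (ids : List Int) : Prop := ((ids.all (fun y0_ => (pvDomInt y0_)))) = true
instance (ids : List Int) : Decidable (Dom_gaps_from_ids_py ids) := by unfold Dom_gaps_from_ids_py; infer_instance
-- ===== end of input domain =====

-- B replaces A's single stateful filter loop by a two-phase pipeline (running maximum, then positive consecutive differences); alternative decomposition, same cost.


-- ===== PORT A =====
-- single loop carrying (gaps, previous); append gap and update previous only when gap > 0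
def gaps_from_ids_py (ids : List Int) : List Int :=
  (ids.foldl (fun (st : List Int × Int) value =>
    let safe_value := max 0 value
    let gap := safe_value - st.2
    if gap ≤ 0 then st else (st.1 ++ [gap], safe_value)) ([], 0)).1

-- ===== PORT B =====
-- phase 1: running maximum of the clamped values, starting at 0 (run[-1] is total since run starts nonempty)
def gaps_from_ids_py_alt (ids : List Int) : List Int :=
  let run := ids.foldl (fun (r : List Int) v => r ++ [max (r.getLastD 0) (max 0 v)]) [0]
  -- phase 2: positive differences of consecutive running-max values
  ((run.zip (run.drop 1)).filter (fun q => q.2 > q.1)).map (fun q => q.2 - q.1)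

-- ===== PRECONDITION & SPEC =====
def Spec_gaps_from_ids_py (ids : List Int) (out : List Int) : Prop := out = gaps_from_ids_py_alt ids
instance (ids : List Int) (out : List Int) : Decidable (Spec_gaps_from_ids_py ids out) := by unfold Spec_gaps_from_ids_py; infer_instance

-- ===== CLAIM (what is proved, stated in full; the proofs are below) =====
def Claim_equal_gaps_from_ids_py : Prop := ∀ (ids : List Int), Dom_gaps_from_ids_py ids → Spec_gaps_from_ids_py ids (gaps_from_ids_py ids)

-- ===== LEMMAS AND PROOFS =====

-- the running-max tail after seed p
def pvScan (p : Int) : List Int → List Int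
  | [] => []
  | x :: xs => max p (max 0 x) :: pvScan (max p (max 0 x)) xs

-- positive consecutive differences of p :: pvScan p xs, recursively
def pvD (p : Int) : List Int → List Int
  | [] => []
  | x :: xs => (if max p (max 0 x) > p then [max p (max 0 x) - p] else []) ++ pvD (max p (max 0 x)) xs

theorem pvRun_eq (xs : List Int) : ∀ (r : List Int) (p : Int), r ≠ [] → r.getLastD 0 = p →
    xs.foldl (fun (r : List Int) v => r ++ [max (r.getLastD 0) (max 0 v)]) r = r ++ pvScan p xs := by
  induction xs with
  | nil => intro r p _ _; simp [pvScan]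
  | cons x xs ih =>
    intro r p hr hp
    simp only [List.foldl_cons, pvScan]
    rw [hp, ih (r ++ [max p (max 0 x)]) (max p (max 0 x)) (by simp) (by simp)]
    simp

theorem pvDiffs_eq (xs : List Int) : ∀ (p : Int),
    ((((p :: pvScan p xs).zip ((p :: pvScan p xs).drop 1)).filter (fun q => q.2 > q.1)).map
      (fun q => q.2 - q.1)) = pvD p xs := by
  induction xs with
  | nil => intro p; simp [pvScan, pvD]
  | cons x xs ih =>
    intro p
    simp only [pvScan, pvD, List.drop_succ_cons, List.drop_zero, List.zip_cons_cons,
      List.filter_cons]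
    by_cases h : max p (max 0 x) > p
    · simp only [h, decide_true, if_pos, List.map_cons]
      have := ih (max p (max 0 x))
      simp only [List.drop_succ_cons, List.drop_zero] at this ⊢
      simp_all
    · have := ih (max p (max 0 x))
      simp only [List.drop_succ_cons, List.drop_zero] at this ⊢
      simp_all

theorem pvFoldA_eq (xs : List Int) : ∀ (g : List Int) (p : Int),
    (xs.foldl (fun (st : List Int × Int) value =>
      let safe_value := max 0 value
      let gap := safe_value - st.2
      if gap ≤ 0 then st else (st.1 ++ [gap], safe_value)) (g, p)).1 = g ++ pvD p xs := by
  induction xs with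
  | nil => intro g p; simp [pvD]
  | cons x xs ih =>
    intro g p
    simp only [List.foldl_cons, pvD]
    by_cases h : max 0 x - p ≤ 0
    · have hm : max p (max 0 x) = p := by omega
      have hng : ¬ max p (max 0 x) > p := by omega
      simp only [h, if_pos, hm, ih]
      simp
    · have hm : max p (max 0 x) = max 0 x := by omega
      have hg : max p (max 0 x) > p := by omega
      simp only [h, if_neg, ih, hm, not_false_iff]
      rw [if_pos (show max 0 x > p by omega)]
      simp [List.append_assoc]

-- ===== VERDICT (by name: the statement is the Claim_ definition above) =====
theorem gaps_from_ids_py_spec : Claim_equal_gaps_from_ids_py := by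
  intro ids _
  unfold Spec_gaps_from_ids_py gaps_from_ids_py gaps_from_ids_py_alt
  rw [pvRun_eq ids [0] 0 (by simp) (by simp)]
  have h := pvDiffs_eq ids 0
  simp only [List.cons_append, List.nil_append] at h ⊢
  rw [h, pvFoldA_eq ids [] 0]
  simp
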